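-- pv_equiv track=rewrite | github.com/djLeeeee/BOJAutoPush | 백준/Silver/10997.별 찍기 － 22/별 찍기 － 22.py | no_more_recursion
-- ===== SOURCE A (Python) =====
-- def no_more_recursion(n):
--     if n == 2:
--         return ['*****', '*', '* ***', '* * *', '* * *', '*   *', '*****']
--     x = no_more_recursion(n - 1)
--     x[1] = '*' + ' ' * (4 * n - 8)
--     content = [0] * (4 * n - 5)
--     content[0] = '* ' + x[0] + '**'
--     for i in range(1, 4 * n - 5):
--         content[i] = '* ' + x[i] + ' *'
--     return ['*' * (4 * n - 3), '*'] + content + ['*' + ' ' * (4 * n - 5) + '*', '*' * (4 * n - 3)]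
-- ===== SOURCE B (Python) =====
-- def no_more_recursion(n):
--     if n < 2:
--         raise ValueError("pattern is only defined for n >= 2")
--     m = 4 * n - 2
--     rows = []
--     for i in range(m + 1):
--         if i <= 2 * n - 1:
--             k = i // 2
--             if i % 2 == 0:
--                 if k == 0:
--                     rows.append('*' * (4 * n - 3))
--                 else:
--                     rows.append('* ' * k + '*' * (4 * (n - k) - 3) + '**' + ' *' * (k - 1))
--             else:
--                 if k == 0:
--                     rows.append('*')
--                 else:
--                     rows.append('* ' * k + '*' + ' ' * (4 * (n - k) - 4) + ' *' * k)
--         else: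
--             k = (m - i) // 2
--             if i % 2 == 0:
--                 rows.append('* ' * k + '*' * (4 * (n - k) - 3) + ' *' * k)
--             else:
--                 rows.append('* ' * k + '*' + ' ' * (4 * (n - k) - 5) + '*' + ' *' * k)
--     return rows
-- ===== Notes on version B (the rewrite author's own statement) =====
-- stated objective: faster
-- what changed: B replaces the recursive wrap-each-row-at-every-level construction by a closed-form builder that emits each of the 4n-1 grid rows directly in one pass from its row index (ring depth k = i//2 resp. (4n-2-i)//2 and parity decide the row's shape).
import Mathlib
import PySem

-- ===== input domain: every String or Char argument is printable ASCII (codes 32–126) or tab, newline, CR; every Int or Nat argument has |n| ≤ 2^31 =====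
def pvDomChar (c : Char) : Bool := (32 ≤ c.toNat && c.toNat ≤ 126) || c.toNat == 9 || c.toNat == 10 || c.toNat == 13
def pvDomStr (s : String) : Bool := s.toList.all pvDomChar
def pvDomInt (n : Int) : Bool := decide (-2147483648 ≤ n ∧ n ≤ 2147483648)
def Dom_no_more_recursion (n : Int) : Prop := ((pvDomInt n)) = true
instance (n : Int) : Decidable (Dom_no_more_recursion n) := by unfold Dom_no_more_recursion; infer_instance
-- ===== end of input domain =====

-- B builds every grid row directly from its index by a closed-form ring formula in one pass,
-- instead of A's recursive re-wrapping of every row at every level (objective: faster).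

-- Python's  s * k  on strings (k ≤ 0 gives ""); used by both ports.
def strTimes (s : String) (k : Int) : String :=
  String.ofList ((List.replicate k.toNat s.toList).flatten)

-- ===== PORT A =====
-- fuel-indexed transliteration of A's recursion; fuel ((n-2).toNat + 1) suffices on Pre_ (n ≥ 2)
def nmrAux : Nat → Int → List String
  | 0, _ => []
  | f+1, n =>
    if n = 2 then ["*****", "*", "* ***", "* * *", "* * *", "*   *", "*****"]
    else
      let x := (nmrAux f (n-1)).set 1 ("*" ++ strTimes " " (4*n-8))  -- x[1] = '*' + ' '*(4n-8)
      -- content[0] = '* '+x[0]+'**'; content[i] = '* '+x[i]+' *' for i in range(1, 4n-5)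
      let content := (PySem.List.pyRange 0 (4*n-5) 1).map (fun i =>
        if i = 0 then "* " ++ ((PySem.List.pyGet? x 0).getD "") ++ "**"
        else "* " ++ ((PySem.List.pyGet? x i).getD "") ++ " *")
      [strTimes "*" (4*n-3), "*"] ++ content ++ ["*" ++ strTimes " " (4*n-5) ++ "*", strTimes "*" (4*n-3)]

def no_more_recursion (n : Int) : List String := nmrAux ((n-2).toNat + 1) n

-- ===== PORT B =====
def rowB (n i : Int) : String :=
  if i ≤ 2*n - 1 then
    let k := PySem.Int.floordiv i 2
    if PySem.Int.mod i 2 = 0 then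
      if k = 0 then strTimes "*" (4*n-3)
      else strTimes "* " k ++ strTimes "*" (4*(n-k)-3) ++ "**" ++ strTimes " *" (k-1)
    else
      if k = 0 then "*"
      else strTimes "* " k ++ "*" ++ strTimes " " (4*(n-k)-4) ++ strTimes " *" k
  else
    let k := PySem.Int.floordiv (4*n-2-i) 2
    if PySem.Int.mod i 2 = 0 then
      strTimes "* " k ++ strTimes "*" (4*(n-k)-3) ++ strTimes " *" k
    else
      strTimes "* " k ++ "*" ++ strTimes " " (4*(n-k)-5) ++ "*" ++ strTimes " *" k

def no_more_recursion_alt (n : Int) : List String :=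
  if n < 2 then []  -- Source B raises ValueError here (outside Pre_); the port returns a junk value
  else (PySem.List.pyRange 0 (4*n-2+1) 1).map (rowB n)

-- ===== PRECONDITION & SPEC =====
-- A recurses on n-1 with base case n == 2: for n < 2 the Python recursion never reaches
-- the base case (RecursionError), so exactly the inputs n ≥ 2 are admitted.
def Pre_no_more_recursion (n : Int) : Prop := 2 ≤ n
instance (n : Int) : Decidable (Pre_no_more_recursion n) := by unfold Pre_no_more_recursion; infer_instance
def pvWitness_no_more_recursion : Int := 2

def Spec_no_more_recursion (n : Int) (out : List String) : Prop := out = no_more_recursion_alt n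
instance (n : Int) (out : List String) : Decidable (Spec_no_more_recursion n out) := by unfold Spec_no_more_recursion; infer_instance

-- ===== CLAIM (what is proved, stated in full; the proofs are below) =====
def Claim_equal_no_more_recursion : Prop := ∀ (n : Int), Dom_no_more_recursion n → Pre_no_more_recursion n → Spec_no_more_recursion n (no_more_recursion n)

-- ===== LEMMAS AND PROOFS =====

theorem strTimes_toList (s : String) (k : Int) :
    (strTimes s k).toList = (List.replicate k.toNat s.toList).flatten := by
  simp [strTimes]

theorem strTimes_succ (s : String) (k : Int) (h : 0 ≤ k) :
    strTimes s (k+1) = s ++ strTimes s k := by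
  apply String.toList_inj.mp
  rw [String.toList_append, strTimes_toList, strTimes_toList,
    (by omega : (k+1).toNat = k.toNat + 1), List.replicate_succ, List.flatten_cons]

theorem strTimes_succ' (s : String) (k : Int) (h : 0 ≤ k) :
    strTimes s (k+1) = strTimes s k ++ s := by
  apply String.toList_inj.mp
  rw [String.toList_append, strTimes_toList, strTimes_toList,
    (by omega : (k+1).toNat = k.toNat + 1), List.replicate_succ', List.flatten_append]
  simp

theorem strTimes_pred (s : String) (k : Int) (h : 1 ≤ k) :
    strTimes s k = strTimes s (k-1) ++ s := by
  have := strTimes_succ' s (k-1) (by omega)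
  rwa [sub_add_cancel] at this

theorem strTimes_zero (s : String) : strTimes s 0 = "" := by
  apply String.toList_inj.mp
  simp [strTimes_toList]

theorem strTimes_one (s : String) : strTimes s 1 = s := by
  apply String.toList_inj.mp
  simp [strTimes_toList]

theorem rowB_zero (n : Int) (h : 1 ≤ n) : rowB n 0 = strTimes "*" (4*n-3) := by
  rw [rowB, if_pos (by omega : (0:Int) ≤ 2*n-1)]
  norm_num [PySem.Int.floordiv_eq_ediv_of_pos, PySem.Int.mod_eq_emod_of_pos]

theorem rowB_one (n : Int) (h : 1 ≤ n) : rowB n 1 = "*" := by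
  rw [rowB, if_pos (by omega : (1:Int) ≤ 2*n-1)]
  norm_num [PySem.Int.floordiv_eq_ediv_of_pos, PySem.Int.mod_eq_emod_of_pos]

theorem rowB_two (n : Int) (h : 3 ≤ n) : rowB n 2 = "* " ++ rowB (n-1) 0 ++ "**" := by
  rw [rowB_zero (n-1) (by omega), rowB, if_pos (by omega : (2:Int) ≤ 2*n-1)]
  norm_num [PySem.Int.floordiv_eq_ediv_of_pos, PySem.Int.mod_eq_emod_of_pos,
    strTimes_one, strTimes_zero]

theorem rowB_three (n : Int) (h : 3 ≤ n) :
    rowB n 3 = "* " ++ ("*" ++ strTimes " " (4*n-8)) ++ " *" := by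
  rw [rowB, if_pos (by omega : (3:Int) ≤ 2*n-1)]
  norm_num [PySem.Int.floordiv_eq_ediv_of_pos, PySem.Int.mod_eq_emod_of_pos, strTimes_one]
  rw [(by ring : 4*(n-1)-4 = 4*n-8), ← String.append_assoc]

theorem rowB_pen (n : Int) (h : 2 ≤ n) :
    rowB n (4*n-3) = "*" ++ strTimes " " (4*n-5) ++ "*" := by
  rw [rowB, if_neg (by omega : ¬ (4*n-3 ≤ 2*n-1))]
  have h1 : (4*n-2-(4*n-3)) = 1 := by ring
  have h2 : (4*n-3) % 2 = 1 := by omega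
  norm_num [PySem.Int.floordiv_eq_ediv_of_pos, PySem.Int.mod_eq_emod_of_pos, h1, h2,
    strTimes_zero]

theorem rowB_last (n : Int) (h : 2 ≤ n) : rowB n (4*n-2) = strTimes "*" (4*n-3) := by
  rw [rowB, if_neg (by omega : ¬ (4*n-2 ≤ 2*n-1))]
  have h1 : (4*n-2-(4*n-2)) = 0 := by ring
  have h2 : (4*n-2) % 2 = 0 := by omega
  norm_num [PySem.Int.floordiv_eq_ediv_of_pos, PySem.Int.mod_eq_emod_of_pos, h1, h2,
    strTimes_zero]

theorem rowB_mid (n i : Int) (_hn : 3 ≤ n) (h2 : 2 ≤ i) (h3 : i ≤ 4*n-6) :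
    rowB n (i+2) = "* " ++ rowB (n-1) i ++ " *" := by
  rw [rowB, rowB]
  simp only [PySem.Int.floordiv_eq_ediv_of_pos (by norm_num : (0:Int) < 2),
    PySem.Int.mod_eq_emod_of_pos (by norm_num : (0:Int) < 2)]
  by_cases hhalf : i + 2 ≤ 2*n - 1
  · rw [if_pos hhalf, if_pos (by omega : i ≤ 2*(n-1)-1)]
    have hk : (i+2)/2 = i/2 + 1 := by omega
    have hq1 : 1 ≤ i/2 := by omega
    rcases (by omega : i % 2 = 0 ∨ i % 2 = 1) with hpar | hpar
    · have hp2 : (i+2) % 2 = 0 := by omega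
      rw [if_pos hp2, if_pos hpar, hk, if_neg (by omega : ¬ i/2 + 1 = 0),
        if_neg (by omega : ¬ i/2 = 0)]
      rw [strTimes_succ "* " (i/2) (by omega), add_sub_cancel_right,
        strTimes_pred " *" (i/2) hq1, (by ring : 4*(n-(i/2+1))-3 = 4*((n-1)-i/2)-3)]
      simp [String.append_assoc]
    · have hp2 : ¬ (i+2) % 2 = 0 := by omega
      rw [if_neg hp2, if_neg (by omega : ¬ i % 2 = 0), hk, if_neg (by omega : ¬ i/2 + 1 = 0),
        if_neg (by omega : ¬ i/2 = 0)]
      rw [strTimes_succ "* " (i/2) (by omega), strTimes_succ' " *" (i/2) (by omega),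
        (by ring : 4*(n-(i/2+1))-4 = 4*((n-1)-i/2)-4)]
      simp [String.append_assoc]
  · rw [if_neg hhalf, if_neg (by omega : ¬ i ≤ 2*(n-1)-1)]
    have hq0 : 0 ≤ (4*(n-1)-2-i)/2 := by omega
    have hk : (4*n-2-(i+2))/2 = (4*(n-1)-2-i)/2 + 1 := by omega
    rcases (by omega : i % 2 = 0 ∨ i % 2 = 1) with hpar | hpar
    · have hp2 : (i+2) % 2 = 0 := by omega
      rw [if_pos hp2, if_pos hpar, hk]
      rw [strTimes_succ "* " _ hq0, strTimes_succ' " *" _ hq0,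
        (by ring : 4*(n-((4*(n-1)-2-i)/2+1))-3 = 4*((n-1)-(4*(n-1)-2-i)/2)-3)]
      simp [String.append_assoc]
    · have hp2 : ¬ (i+2) % 2 = 0 := by omega
      rw [if_neg hp2, if_neg (by omega : ¬ i % 2 = 0), hk]
      rw [strTimes_succ "* " _ hq0, strTimes_succ' " *" _ hq0,
        (by ring : 4*(n-((4*(n-1)-2-i)/2+1))-5 = 4*((n-1)-(4*(n-1)-2-i)/2)-5)]
      simp [String.append_assoc]

theorem alt_eq_map (n : Int) (h : 2 ≤ n) :
    no_more_recursion_alt n = (List.range (4*n-1).toNat).map (fun j : Nat => rowB n (j:Int)) := by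
  unfold no_more_recursion_alt
  rw [if_neg (by omega : ¬ n < 2)]
  rw [(by omega : 4*n-2+1 = ((4*n-1).toNat : Int)), PySem.List.pyRange_zero_natCast,
    List.map_map]
  exact List.map_congr_left (fun a _ => rfl)

theorem alt_length (n : Int) (h : 2 ≤ n) :
    (no_more_recursion_alt n).length = (4*n-1).toNat := by
  rw [alt_eq_map n h]; simp

theorem get_x (n : Int) (h : 3 ≤ n) (j : Nat) (hj : j < (4*n-5).toNat) :
    (PySem.List.pyGet?
        ((no_more_recursion_alt (n-1)).set 1 ("*" ++ strTimes " " (4*n-8))) (j:Int)).getD ""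
      = if j = 1 then "*" ++ strTimes " " (4*n-8) else rowB (n-1) (j:Int) := by
  rw [PySem.List.pyGet?_natCast, List.getElem?_set,
    alt_length (n-1) (by omega)]
  have hlen : (4*(n-1)-1).toNat = (4*n-5).toNat := by omega
  by_cases h1 : (1:Nat) = j
  · rw [if_pos h1, if_pos (by omega), if_pos h1.symm]; rfl
  · rw [if_neg h1, if_neg (fun hh => h1 hh.symm), alt_eq_map (n-1) (by omega)]
    rw [List.getElem?_map, List.getElem?_range (by omega : j < (4*(n-1)-1).toNat)]
    rfl

theorem main_aux : ∀ (m : Nat) (n : Int), n = (m:Int) + 2 →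
    nmrAux (m+1) n = no_more_recursion_alt n := by
  intro m
  induction m with
  | zero =>
    intro n hn
    subst hn
    decide
  | succ m ih =>
    intro n hn
    have hm0 : (0:Int) ≤ (m:Int) := Int.natCast_nonneg m
    have hn3 : 3 ≤ n := by push_cast at hn; omega
    rw [(rfl : m+1+1 = (m+1)+1), nmrAux, if_neg (by omega : ¬ n = 2)]
    have hx : nmrAux (m+1) (n-1) = no_more_recursion_alt (n-1) := by
      apply ih; push_cast at hn ⊢; omega
    rw [hx]
    -- RHS as a map over List.range, decomposed into 2 + middle + 2
    rw [alt_eq_map n (by omega)]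
    have hsplit : (4*n-1).toNat = 2 + ((4*n-5).toNat + 2) := by omega
    rw [hsplit, List.range_add, List.range_add]
    -- LHS content as a map over List.range
    have hR : PySem.List.pyRange 0 (4*n-5) 1
        = List.map (fun k : Nat => (k:Int)) (List.range (4*n-5).toNat) := by
      conv_lhs => rw [(by omega : 4*n-5 = (((4*n-5).toNat : Nat) : Int))]
      exact PySem.List.pyRange_zero_natCast _
    rw [hR]
    rw [(by decide : List.range 2 = [0,1])]
    simp only [List.map_append, List.map_map, List.map_cons, List.map_nil, Function.comp_def,
      Nat.cast_zero, Nat.cast_one, add_zero]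
    -- head rows
    rw [rowB_zero n (by omega), rowB_one n (by omega)]
    -- tail rows
    have ht1 : ((2 + (4*n-5).toNat : Nat) : Int) = 4*n-3 := by push_cast; omega
    have ht2 : ((2 + ((4*n-5).toNat + 1) : Nat) : Int) = 4*n-2 := by push_cast; omega
    rw [ht1, ht2, rowB_pen n (by omega), rowB_last n (by omega)]
    -- middle rows
    have hmid : ∀ j ∈ List.range (4*n-5).toNat,
        (if ((j:Nat):Int) = 0 then
          "* " ++ ((PySem.List.pyGet?
            ((no_more_recursion_alt (n-1)).set 1 ("*" ++ strTimes " " (4*n-8))) 0).getD "") ++ "**"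
         else
          "* " ++ ((PySem.List.pyGet?
            ((no_more_recursion_alt (n-1)).set 1 ("*" ++ strTimes " " (4*n-8))) ((j:Nat):Int)).getD "") ++ " *")
        = rowB n ((2 + j : Nat) : Int) := by
      intro j hj
      rw [List.mem_range] at hj
      have hcast : ((2 + j : Nat) : Int) = ((j:Nat):Int) + 2 := by push_cast; omega
      rw [hcast]
      match j, hj with
      | 0, hj =>
        have g0 := get_x n hn3 0 hj
        norm_num at g0 ⊢
        rw [rowB_two n hn3, g0]
      | 1, hj =>
        have g1 := get_x n hn3 1 hj
        norm_num at g1 ⊢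
        rw [rowB_three n hn3, g1]
      | (jj+2), hj =>
        rw [if_neg (by push_cast; omega), get_x n hn3 (jj+2) hj, if_neg (by omega)]
        rw [rowB_mid n (((jj+2 : Nat)) : Int) hn3 (by push_cast; omega) (by push_cast; omega)]
    rw [List.map_congr_left hmid]
    rfl

-- ===== VERDICT (by name: the statement is the Claim_ definition above) =====
theorem no_more_recursion_spec : Claim_equal_no_more_recursion := by
  intro n _ hpre
  have hpre' : 2 ≤ n := hpre
  show no_more_recursion n = no_more_recursion_alt n
  unfold no_more_recursion
  have := main_aux (n-2).toNat n (by omega)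
  exact this
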